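-- pv_equiv track=rewrite | github.com/paulstothard/sort_markdown_by_headings | sort_markdown_by_headings.py | sort_markdown_sections
-- ===== SOURCE A (Python) =====
-- def sort_markdown_sections(markdown_text):
--     # Split the text into lines
--     lines = markdown_text.split("\n")
--
--     # Initialize variables
--     sorted_text = []  # List to hold the sorted text
--     current_section = []  # List to hold the lines of the current section
--     in_code_block = False  # Flag to track if the current line is inside a code block
--
--     # Helper function to sort and add the current section to sorted_text
--     def sort_and_add_current_section():
--         if current_section:
--             # Sort the current section while ignoring the heading line
--             heading = current_section[0]
--             sorted_section = sorted(current_section[1:], key=str.lower)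
--
--             # Remove all blank lines from the section
--             sorted_section = [line for line in sorted_section if line.strip()]
--
--             # If the section is not empty, add a blank line before and after
--             if sorted_section:
--                 sorted_section.insert(0, "")
--                 sorted_section.append("")
--             else:
--                 # Otherwise, add a single blank line
--                 sorted_section.append("")
--
--             # Combine the heading and the sorted lines, then append to sorted_text
--             sorted_text.extend([heading] + sorted_section)
--
--     # Iterate over the lines
--     for line in lines:
--         # Toggle the in_code_block flag if a code block delimiter is found
--         if line.strip().startswith("```"):
--             in_code_block = not in_code_block
--             # Add the line to the current section or start a new one
--             if current_section:
--                 current_section.append(line)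
--             else:
--                 sorted_text.append(line)
--             continue
--
--         # Check if the line is a heading and not in a code block
--         if line.startswith("#") and not in_code_block:
--             # Sort the current section and add it to sorted_text
--             sort_and_add_current_section()
--             # Start a new section with the current heading
--             current_section = [line]
--         else:
--             # Add the line to the current section or to the sorted text if outside of any section
--             if current_section:
--                 current_section.append(line)
--             else:
--                 sorted_text.append(line)
--
--     # Sort and add the last section after the loop ends
--     sort_and_add_current_section()
--
--     # Join the sorted sections into a single string
--     sorted_markdown_text = "\n".join(sorted_text)
--
--     return sorted_markdown_text
-- ===== SOURCE B (Python) =====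
-- def sort_markdown_sections(markdown_text):
--     lines = markdown_text.split("\n")
--     # Pass 1: record only the index of every heading line (fence-parity aware).
--     heads = []
--     in_code = False
--     for i, line in enumerate(lines):
--         if line.strip().startswith("```"):
--             in_code = not in_code
--         elif not in_code and line.startswith("#"):
--             heads.append(i)
--     # Pass 2: rebuild the document from slices of the original line list:
--     # the preamble slice, then for each heading its body slice sorted
--     # case-insensitively, blanks dropped, wrapped in blank lines.
--     bounds = heads + [len(lines)]
--     out = lines[:bounds[0]]
--     for s, e in zip(heads, bounds[1:]):
--         body = [l for l in sorted(lines[s + 1:e], key=str.lower) if l.strip()]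
--         out += [lines[s]] + ([""] + body if body else []) + [""]
--     return "\n".join(out)
-- ===== Notes on version B (the rewrite author's own statement) =====
-- stated objective: alternative
-- what changed: A builds section buffers as it scans, flushing each on the next heading; B never materializes section buffers: one pass records only the heading line indices (fence-parity aware), then the output is rebuilt from index slices lines[s+1:e] of the original line list between consecutive heading indices.
import Mathlib
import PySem

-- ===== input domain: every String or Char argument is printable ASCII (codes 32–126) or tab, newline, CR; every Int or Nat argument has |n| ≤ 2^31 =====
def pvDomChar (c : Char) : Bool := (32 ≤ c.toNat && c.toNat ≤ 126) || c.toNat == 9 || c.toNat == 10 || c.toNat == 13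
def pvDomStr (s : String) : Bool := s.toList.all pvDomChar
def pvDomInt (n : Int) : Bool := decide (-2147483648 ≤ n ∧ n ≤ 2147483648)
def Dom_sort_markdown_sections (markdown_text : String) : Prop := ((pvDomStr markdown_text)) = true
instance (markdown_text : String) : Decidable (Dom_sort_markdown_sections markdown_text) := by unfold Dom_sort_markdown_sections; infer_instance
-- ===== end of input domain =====

-- B replaces A's buffer-and-flush section accumulation by an index-based algorithm: one pass
-- records only heading line indices, then the output is rebuilt from slices of the line list
-- between consecutive heading indices ("alternative"; same cost).

-- ===== PORT A =====
-- helper 'sort_and_add_current_section': returns sorted_text with the transformed section appended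
def pvSortAndAdd (sorted_text current_section : List String) : List String :=
  match current_section with
  | [] => sorted_text
  | heading :: rest =>
    let sorted_section := PySem.List.sorted rest (fun l => PySem.Str.lower l) false
    let sorted_section := sorted_section.filter (fun l => !(PySem.Str.strip l == ""))
    let sorted_section := if sorted_section ≠ [] then "" :: sorted_section ++ [""]
                          else sorted_section ++ [""]
    sorted_text ++ [heading] ++ sorted_section

-- the loop body over state (sorted_text, current_section, in_code_block)
def pvStepA (st : List String × List String × Bool) (line : String) :
    List String × List String × Bool :=
  if PySem.Str.startswith (PySem.Str.strip line) "```" then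
    let icb := !st.2.2
    if st.2.1 ≠ [] then (st.1, st.2.1 ++ [line], icb) else (st.1 ++ [line], st.2.1, icb)
  else if PySem.Str.startswith line "#" && !st.2.2 then
    (pvSortAndAdd st.1 st.2.1, [line], st.2.2)
  else
    if st.2.1 ≠ [] then (st.1, st.2.1 ++ [line], st.2.2) else (st.1 ++ [line], st.2.1, st.2.2)

def sort_markdown_sections (markdown_text : String) : String :=
  -- split("\n") is exact: the separator is non-empty, so split? is some
  PySem.Str.join "\n"
    (pvSortAndAdd
      (((PySem.Str.split? markdown_text "\n").getD []).foldl pvStepA ([], [], false)).1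
      (((PySem.Str.split? markdown_text "\n").getD []).foldl pvStepA ([], [], false)).2.1)

-- ===== PORT B =====
-- pass-1 loop body over state (heads, in_code), folded over enumerate(lines)
def pvStepB (st : List Int × Bool) (p : Int × String) : List Int × Bool :=
  if PySem.Str.startswith (PySem.Str.strip p.2) "```" then (st.1, !st.2)
  else if !st.2 && PySem.Str.startswith p.2 "#" then (st.1 ++ [p.1], st.2)
  else st

-- pass-2 body for one (s, e) pair of zip(heads, bounds[1:])
def pvSec (lines : List String) (p : Int × Int) : List String :=
  let body := (PySem.List.sorted (PySem.List.slice lines (some (p.1 + 1)) (some p.2))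
                 (fun l => PySem.Str.lower l) false).filter
                (fun l => !(PySem.Str.strip l == ""))
  -- lines[p.1]: p.1 is a recorded index of an existing line, so pyGet? is some (getD unreachable)
  [(PySem.List.pyGet? lines p.1).getD ""] ++ (if body ≠ [] then "" :: body else []) ++ [""]

def sort_markdown_sections_alt (markdown_text : String) : String :=
  -- split("\n") is exact: the separator is non-empty, so split? is some
  let lines := (PySem.Str.split? markdown_text "\n").getD []
  let heads := ((PySem.List.enumerate lines).foldl pvStepB ([], false)).1
  let bounds := heads ++ [(lines.length : Int)]
  -- bounds[0]: bounds is never empty, so headD's default is unreachable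
  PySem.Str.join "\n"
    ((heads.zip bounds.tail).foldl (fun out p => out ++ pvSec lines p)
      (PySem.List.slice lines none (some (bounds.headD 0))))

-- ===== PRECONDITION & SPEC =====
def Spec_sort_markdown_sections (markdown_text : String) (out : String) : Prop := out = sort_markdown_sections_alt markdown_text
instance (markdown_text : String) (out : String) : Decidable (Spec_sort_markdown_sections markdown_text out) := by unfold Spec_sort_markdown_sections; infer_instance

-- ===== CLAIM (what is proved, stated in full; the proofs are below) =====
def Claim_equal_sort_markdown_sections : Prop := ∀ (markdown_text : String), Dom_sort_markdown_sections markdown_text → Spec_sort_markdown_sections markdown_text (sort_markdown_sections markdown_text)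

-- ===== LEMMAS AND PROOFS =====

-- the transformed section whose heading is x and whose body is rest
def pvTransform (sec : List String) : List String :=
  match sec with
  | [] => []
  | heading :: rest =>
    let body := (PySem.List.sorted rest (fun l => PySem.Str.lower l) false).filter
                  (fun l => !(PySem.Str.strip l == ""))
    [heading] ++ (if body ≠ [] then "" :: body else []) ++ [""]

-- lines[s:e] for Nat bounds
def pvSlc (lines : List String) (s e : Nat) : List String := (lines.take e).drop s

-- flattened transforms of the COMPLETED sections determined by a head-index list
def pvMid (done : List String) : List Nat → List String
  | [] => []
  | [_] => []
  | a :: b :: t => pvTransform (pvSlc done a b) ++ pvMid done (b :: t)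

-- A's loop state as a function of the scanned prefix and the recorded head indices
def pvBlocks (done : List String) (hs : List Nat) (icb : Bool) :
    List String × List String × Bool :=
  match hs with
  | [] => (done, [], icb)
  | a :: t => (done.take a ++ pvMid done (a :: t),
               done.drop ((a :: t).getLast (List.cons_ne_nil a t)), icb)

-- proof-level Nat version of B's pass 1
def pvScanStep (k : Nat) (st : List Nat × Bool) (line : String) : List Nat × Bool :=
  if PySem.Str.startswith (PySem.Str.strip line) "```" then (st.1, !st.2)
  else if !st.2 && PySem.Str.startswith line "#" then (st.1 ++ [k], st.2)
  else st

def pvScanList : List String → Nat → List Nat × Bool → List Nat × Bool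
  | [], _, st => st
  | l :: ls, k, st => pvScanList ls (k + 1) (pvScanStep k st l)

lemma pvSortAndAdd_eq (acc cs : List String) :
    pvSortAndAdd acc cs = acc ++ pvTransform cs := by
  cases cs with
  | nil => simp [pvSortAndAdd, pvTransform]
  | cons h r =>
    simp only [pvSortAndAdd, pvTransform]
    split_ifs with hb
    · simp
    · rw [not_ne_iff] at hb
      simp [hb]

lemma pvMid_append (done : List String) (line : String) (hs : List Nat)
    (hb : ∀ h ∈ hs, h ≤ done.length) :
    pvMid (done ++ [line]) hs = pvMid done hs := by
  induction hs with
  | nil => rfl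
  | cons a t ih =>
    cases t with
    | nil => rfl
    | cons b t' =>
      have hb' : b ≤ done.length := hb b (by simp)
      have : pvSlc (done ++ [line]) a b = pvSlc done a b := by
        simp [pvSlc, List.take_append_of_le_length hb']
      simp only [pvMid, this]
      rw [ih (fun h hh => hb h (by simp_all))]

lemma pvMid_snoc (done : List String) (k : Nat) (hs : List Nat) (h : hs ≠ []) :
    pvMid done (hs ++ [k]) = pvMid done hs ++ pvTransform (pvSlc done (hs.getLast h) k) := by
  induction hs with
  | nil => simp at h
  | cons a t ih =>
    cases t with
    | nil => simp [pvMid]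
    | cons b t' =>
      simp only [List.cons_append, pvMid]
      have h2 := ih (List.cons_ne_nil b t')
      simp only [List.cons_append] at h2
      rw [h2]
      simp [List.getLast_cons]

lemma pvDrop_ne_nil (done : List String) (g : Nat) (h : g < done.length) :
    done.drop g ≠ [] := by
  intro hc
  have := congrArg List.length hc
  simp at this
  omega

-- shape lemmas for pvBlocks on an extended prefix
lemma pvBlocks_cons_line (done : List String) (line : String) (a : Nat) (t : List Nat)
    (icb icb' : Bool) (hb : ∀ h ∈ a :: t, h < done.length) :
    pvBlocks (done ++ [line]) (a :: t) icb'
      = ((pvBlocks done (a :: t) icb).1, (pvBlocks done (a :: t) icb).2.1 ++ [line], icb') := by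
  have ha : a ≤ done.length := le_of_lt (hb a (by simp))
  have hg : (a :: t).getLast (List.cons_ne_nil a t) ≤ done.length :=
    le_of_lt (hb _ (List.getLast_mem _))
  simp only [pvBlocks]
  rw [List.take_append_of_le_length ha, pvMid_append done line _ (fun h hh => le_of_lt (hb h hh)),
    List.drop_append_of_le_length hg]

lemma pvBlocks_flush (done : List String) (line : String) (hs : List Nat)
    (icb icb' : Bool) (hb : ∀ h ∈ hs, h < done.length) :
    pvBlocks (done ++ [line]) (hs ++ [done.length]) icb'
      = (pvSortAndAdd (pvBlocks done hs icb).1 (pvBlocks done hs icb).2.1, [line], icb') := by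
  cases hs with
  | nil =>
    simp only [List.nil_append, pvBlocks, pvSortAndAdd, pvMid, Prod.mk.injEq]
    refine ⟨?_, ?_, trivial⟩
    · rw [List.take_append_of_le_length (le_refl _)]
      simp
    · simp
  | cons a t =>
    have ha : a ≤ done.length := le_of_lt (hb a (by simp))
    have hsnoc : (a :: t) ++ [done.length] = a :: (t ++ [done.length]) := by simp
    rw [hsnoc]
    simp only [pvBlocks, pvSortAndAdd_eq, Prod.mk.injEq]
    have hmid : pvMid (done ++ [line]) (a :: (t ++ [done.length]))
        = pvMid done (a :: t)
          ++ pvTransform (done.drop ((a :: t).getLast (List.cons_ne_nil a t))) := by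
      rw [← hsnoc, pvMid_append done line _ (by
          intro h hh
          rcases List.mem_append.1 hh with hh | hh
          · exact le_of_lt (hb h hh)
          · simp_all),
        pvMid_snoc done done.length (a :: t) (List.cons_ne_nil a t)]
      congr 1
      simp [pvSlc, List.take_length]
    refine ⟨?_, ?_, trivial⟩
    · rw [hmid, List.take_append_of_le_length ha]
      simp
    · have h6 : (a :: (t ++ [done.length])).getLast? = some done.length := by
        rw [← List.cons_append]
        exact List.getLast?_concat
      have h5 : (a :: (t ++ [done.length])).getLast (List.cons_ne_nil _ _) = done.length := by
        have h8 := List.getLast?_eq_some_getLast (List.cons_ne_nil a (t ++ [done.length]))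
        rw [h6] at h8
        exact (Option.some.inj h8).symm
      rw [h5]
      simp

lemma pvCur_ne_nil (done : List String) (a : Nat) (t : List Nat) (icb : Bool)
    (hb : ∀ h ∈ a :: t, h < done.length) :
    (pvBlocks done (a :: t) icb).2.1 ≠ [] := by
  have hg : (a :: t).getLast (List.cons_ne_nil a t) < done.length :=
    hb _ (List.getLast_mem _)
  simpa [pvBlocks] using pvDrop_ne_nil done _ hg

lemma pvBlocks_snd_snd (done : List String) (hs : List Nat) (icb : Bool) :
    (pvBlocks done hs icb).2.2 = icb := by
  cases hs <;> simp [pvBlocks]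

-- one step of A's loop, simulated on the index state
lemma pvStep_sim (done : List String) (line : String) (hs : List Nat) (icb : Bool)
    (hb : ∀ h ∈ hs, h < done.length) :
    pvStepA (pvBlocks done hs icb) line =
      pvBlocks (done ++ [line]) (pvScanStep done.length (hs, icb) line).1
        (pvScanStep done.length (hs, icb) line).2 := by
  by_cases hc1 : PySem.Str.startswith (PySem.Str.strip line) "```" = true
  · -- fence line: append to current section or output, toggle the flag
    have hstep : pvScanStep done.length (hs, icb) line = (hs, !icb) := by
      unfold pvScanStep
      rw [if_pos hc1]
    rw [hstep]
    cases hs with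
    | nil =>
      unfold pvStepA
      rw [if_pos hc1, if_neg (by simp [pvBlocks])]
      simp [pvBlocks]
    | cons a t =>
      unfold pvStepA
      rw [if_pos hc1, if_pos (pvCur_ne_nil done a t icb hb),
        pvBlocks_cons_line done line a t icb (!icb) hb, pvBlocks_snd_snd]
  · by_cases hc2 : (PySem.Str.startswith line "#" && !icb) = true
    · -- heading outside a code block: flush the open section, start a new one
      have hc3 : (!icb && PySem.Str.startswith line "#") = true := by
        rw [Bool.and_comm]; exact hc2
      have hstep : pvScanStep done.length (hs, icb) line = (hs ++ [done.length], icb) := by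
        unfold pvScanStep
        rw [if_neg hc1, if_pos hc3]
      rw [hstep]
      have hc2' : (PySem.Str.startswith line "#" && !(pvBlocks done hs icb).2.2) = true := by
        rw [pvBlocks_snd_snd]; exact hc2
      unfold pvStepA
      rw [if_neg hc1, if_pos hc2', pvBlocks_flush done line hs icb icb hb, pvBlocks_snd_snd]
    · -- ordinary line (or a heading inside a code block): append
      have hc3 : ¬ ((!icb && PySem.Str.startswith line "#") = true) := by
        rw [Bool.and_comm]; exact hc2
      have hstep : pvScanStep done.length (hs, icb) line = (hs, icb) := by
        unfold pvScanStep
        rw [if_neg hc1, if_neg hc3]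
      rw [hstep]
      have hc2' : ¬ ((PySem.Str.startswith line "#" && !(pvBlocks done hs icb).2.2) = true) := by
        rw [pvBlocks_snd_snd]; exact hc2
      cases hs with
      | nil =>
        unfold pvStepA
        rw [if_neg hc1, if_neg hc2', if_neg (by simp [pvBlocks])]
        simp [pvBlocks]
      | cons a t =>
        unfold pvStepA
        rw [if_neg hc1, if_neg hc2', if_pos (pvCur_ne_nil done a t icb hb),
          pvBlocks_cons_line done line a t icb icb hb, pvBlocks_snd_snd]

lemma pvScanStep_fst (k : Nat) (hs : List Nat) (icb : Bool) (line : String) :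
    (pvScanStep k (hs, icb) line).1 = hs ∨ (pvScanStep k (hs, icb) line).1 = hs ++ [k] := by
  simp only [pvScanStep]
  split_ifs <;> simp

lemma pvScan_bound (ls : List String) : ∀ (k : Nat) (hs : List Nat) (icb : Bool),
    (∀ h ∈ hs, h < k) → ∀ h ∈ (pvScanList ls k (hs, icb)).1, h < k + ls.length := by
  induction ls with
  | nil => intro k hs icb hb h hh; simpa using hb h (by simpa [pvScanList] using hh)
  | cons l t ih =>
    intro k hs icb hb h hh
    simp only [pvScanList] at hh
    have hb' : ∀ x ∈ (pvScanStep k (hs, icb) l).1, x < k + 1 := by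
      rcases pvScanStep_fst k hs icb l with he | he <;> rw [he]
      · intro x hx; exact lt_of_lt_of_le (hb x hx) (by omega)
      · intro x hx
        rcases List.mem_append.1 hx with hx | hx
        · exact lt_of_lt_of_le (hb x hx) (by omega)
        · simp_all
    have := ih (k + 1) (pvScanStep k (hs, icb) l).1 (pvScanStep k (hs, icb) l).2 hb' h
      (by simpa using hh)
    simpa [Nat.add_assoc, Nat.add_comm 1 t.length] using this

lemma pvScan_pairwise (ls : List String) : ∀ (k : Nat) (hs : List Nat) (icb : Bool),
    (∀ h ∈ hs, h < k) → hs.Pairwise (· < ·) → (pvScanList ls k (hs, icb)).1.Pairwise (· < ·) := by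
  induction ls with
  | nil => intro _ _ _ _ hc; simpa [pvScanList] using hc
  | cons l t ih =>
    intro k hs icb hb hc
    simp only [pvScanList]
    rcases hstep : pvScanStep k (hs, icb) l with ⟨hs', icb'⟩
    have hfst : hs' = hs ∨ hs' = hs ++ [k] := by
      have h9 := pvScanStep_fst k hs icb l
      rw [hstep] at h9
      simpa using h9
    have hb' : ∀ x ∈ hs', x < k + 1 := by
      rcases hfst with he | he <;> subst he
      · intro x hx; exact lt_of_lt_of_le (hb x hx) (by omega)
      · intro x hx
        rcases List.mem_append.1 hx with hx | hx
        · exact lt_of_lt_of_le (hb x hx) (by omega)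
        · simp_all
    have hc' : hs'.Pairwise (· < ·) := by
      rcases hfst with he | he <;> subst he
      · exact hc
      · rw [List.pairwise_append]
        refine ⟨hc, List.pairwise_singleton _ _, ?_⟩
        intro x hx y hy
        simp only [List.mem_singleton] at hy
        subst hy
        exact hb x hx
    exact ih (k + 1) hs' icb' hb' hc'

-- the whole loop of A, simulated
lemma pvFold_sim (rest : List String) : ∀ (done : List String) (hs : List Nat) (icb : Bool),
    (∀ h ∈ hs, h < done.length) →
    rest.foldl pvStepA (pvBlocks done hs icb) =
      pvBlocks (done ++ rest) (pvScanList rest done.length (hs, icb)).1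
        (pvScanList rest done.length (hs, icb)).2 := by
  induction rest with
  | nil => intro done hs icb _; simp [pvScanList]
  | cons l t ih =>
    intro done hs icb hb
    simp only [List.foldl_cons, pvScanList]
    rw [pvStep_sim done l hs icb hb]
    have hb' : ∀ h ∈ (pvScanStep done.length (hs, icb) l).1, h < (done ++ [l]).length := by
      simp only [List.length_append, List.length_cons, List.length_nil]
      rcases pvScanStep_fst done.length hs icb l with he | he <;> rw [he]
      · intro x hx
        have := hb x hx
        omega
      · intro x hx
        rcases List.mem_append.1 hx with hx | hx
        · have := hb x hx
          omega
        · simp at hx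
          omega
    have := ih (done ++ [l]) (pvScanStep done.length (hs, icb) l).1
      (pvScanStep done.length (hs, icb) l).2 hb'
    rw [this]
    simp

-- B's Int-valued pass 1 is the cast of the Nat-valued scan
lemma pvScan_cast (ls : List String) : ∀ (k : Nat) (hs : List Nat) (icb : Bool),
    (PySem.List.enumerate ls (k : Int)).foldl pvStepB (hs.map (fun n : Nat => (n : Int)), icb)
      = ((pvScanList ls k (hs, icb)).1.map (fun n : Nat => (n : Int)),
         (pvScanList ls k (hs, icb)).2) := by
  induction ls with
  | nil => intro k hs icb; simp [PySem.List.enumerate_nil, pvScanList]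
  | cons l t ih =>
    intro k hs icb
    rw [PySem.List.enumerate_cons]
    simp only [List.foldl_cons, pvScanList]
    have hstep : pvStepB (hs.map (fun n : Nat => (n : Int)), icb) ((k : Int), l)
        = ((pvScanStep k (hs, icb) l).1.map (fun n : Nat => (n : Int)),
           (pvScanStep k (hs, icb) l).2) := by
      simp only [pvStepB, pvScanStep]
      split_ifs <;> simp
    rw [hstep]
    have : ((k : Int) + 1) = ((k + 1 : Nat) : Int) := by push_cast; ring
    rw [this, ih (k + 1)]

-- pvSec on a valid (s, e) pair is the transform of the slice
lemma pvSec_eq (lines : List String) (s e : Nat) (hse : s < e) (he : e ≤ lines.length) :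
    pvSec lines ((s : Int), (e : Int)) = pvTransform (pvSlc lines s e) := by
  have hs : s < lines.length := lt_of_lt_of_le hse he
  have h1 : ((s : Int) + 1) = ((s + 1 : Nat) : Int) := by push_cast; ring
  have hslice : PySem.List.slice lines (some ((s : Int) + 1)) (some (e : Int))
      = (lines.drop (s + 1)).take (e - (s + 1)) := by
    rw [h1, PySem.List.slice_natCast]
  have hcons : pvSlc lines s e = lines[s] :: (lines.drop (s + 1)).take (e - (s + 1)) := by
    have hlen : s < (lines.take e).length := by
      rw [List.length_take]; omega
    rw [pvSlc, List.drop_eq_getElem_cons hlen]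
    congr 1
    · exact List.getElem_take
    · rw [List.drop_take]
  rw [hcons]
  simp only [pvSec, pvTransform, hslice]
  rw [PySem.List.pyGet?_natCast]
  simp [List.getElem?_eq_getElem hs]

-- pass 2 of B equals the completed-section transforms plus the flushed last section
lemma pvZip_flatMap (lines : List String) : ∀ (hs : List Nat) (h : hs ≠ []),
    hs.Pairwise (· < ·) → (∀ x ∈ hs, x < lines.length) →
    (hs.zip (hs.tail ++ [lines.length])).flatMap
        (fun p => pvSec lines ((p.1 : Int), (p.2 : Int)))
      = pvMid lines hs ++ pvTransform (lines.drop (hs.getLast h)) := by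
  intro hs
  induction hs with
  | nil => intro h; simp at h
  | cons a t ih =>
    intro _ hc hb
    cases t with
    | nil =>
      have ha : a < lines.length := hb a (by simp)
      simp only [List.tail_cons, List.nil_append, List.zip_cons_cons, List.zip_nil_right,
        List.flatMap_cons, List.flatMap_nil, List.append_nil, pvMid, List.getLast_singleton]
      rw [pvSec_eq lines a lines.length ha (le_refl _)]
      simp [pvSlc, List.take_length]
    | cons b t' =>
      have hab : a < b := (List.pairwise_cons.1 hc).1 b (by simp)
      have hbl : b < lines.length := hb b (by simp)
      simp only [List.tail_cons, pvMid]
      have hzc : (a :: b :: t').zip ((b :: t') ++ [lines.length])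
          = (a, b) :: (b :: t').zip (t' ++ [lines.length]) := rfl
      rw [hzc, List.flatMap_cons, pvSec_eq lines a b hab (le_of_lt hbl)]
      have := ih (List.cons_ne_nil b t') (List.pairwise_cons.1 hc).2
        (fun x hx => hb x (by simp_all))
      simp only [List.tail_cons] at this
      rw [this, List.getLast_cons (List.cons_ne_nil b t')]
      simp

-- ===== VERDICT (by name: the statement is the Claim_ definition above) =====
theorem sort_markdown_sections_spec : Claim_equal_sort_markdown_sections := by
  intro md _
  unfold Spec_sort_markdown_sections sort_markdown_sections
  set lines := (PySem.Str.split? md "\n").getD [] with hlines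
  have halt : sort_markdown_sections_alt md = PySem.Str.join "\n"
      ((((PySem.List.enumerate lines).foldl pvStepB ([], false)).1.zip
          ((((PySem.List.enumerate lines).foldl pvStepB ([], false)).1
            ++ [(lines.length : Int)]).tail)).foldl
        (fun out p => out ++ pvSec lines p)
        (PySem.List.slice lines none
          (some ((((PySem.List.enumerate lines).foldl pvStepB ([], false)).1
            ++ [(lines.length : Int)]).headD 0)))) := rfl
  rw [halt]
  have h0 : (([] : List String), ([] : List String), false) = pvBlocks [] [] false := rfl
  have hfold := pvFold_sim lines [] [] false (by intro h hh; simp at hh)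
  simp only [List.nil_append, List.length_nil] at hfold
  have hbound0 := pvScan_bound lines 0 [] false (by intro h hh; simp at hh)
  have hbound : ∀ h ∈ (pvScanList lines 0 ([], false)).1, h < lines.length := by
    intro h hh
    have := hbound0 h hh
    omega
  have hchain := pvScan_pairwise lines 0 [] false (by intro h hh; simp at hh) (by simp)
  have hcast : (PySem.List.enumerate lines).foldl pvStepB ([], false)
      = ((pvScanList lines 0 ([], false)).1.map (fun n : Nat => (n : Int)),
         (pvScanList lines 0 ([], false)).2) := by
    have h9 := pvScan_cast lines 0 [] false
    simp only [Nat.cast_zero, List.map_nil] at h9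
    exact h9
  rw [h0, hfold, hcast]
  clear halt
  generalize hS : pvScanList lines 0 ([], false) = S at hbound hchain ⊢
  obtain ⟨hs, icb⟩ := S
  simp only at hbound hchain ⊢
  cases hs with
  | nil =>
    simp only [pvBlocks, List.map_nil, List.nil_append, List.zip_nil_left, List.foldl_nil,
      List.headD_cons, List.tail_cons, pvSortAndAdd]
    congr 1
    rw [PySem.List.slice_to_natCast]
    simp
  | cons a t =>
    -- B side: the seed slice and the zip over cast heads
    have hseed : PySem.List.slice lines none
        (some ((((a :: t).map (fun n : Nat => (n : Int))) ++ [(lines.length : Int)]).headD 0))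
        = lines.take a := by
      simp only [List.map_cons, List.cons_append, List.headD_cons]
      rw [PySem.List.slice_to_natCast]
    have hzip : ((a :: t).map (fun n : Nat => (n : Int))).zip
          ((((a :: t).map (fun n : Nat => (n : Int))) ++ [(lines.length : Int)]).tail)
        = ((a :: t).zip ((a :: t).tail ++ [lines.length])).map
            (fun p => ((p.1 : Int), (p.2 : Int))) := by
      have h10 : (((a :: t).map (fun n : Nat => (n : Int))) ++ [(lines.length : Int)]).tail
          = ((a :: t).tail ++ [lines.length]).map (fun n : Nat => (n : Int)) := by
        simp
      rw [h10, List.zip_map]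
      rfl
    rw [hseed, hzip, PySem.List.foldl_append_eq_flatMap, List.flatMap_map]
    have hflat := pvZip_flatMap lines (a :: t) (List.cons_ne_nil a t) hchain hbound
    rw [hflat]
    -- A side
    simp only [pvBlocks, pvSortAndAdd_eq]
    simp
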